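-- pv_equiv track=rewrite | github.com/dune-mirrors/dune-testtools | python/compile_definitions.py | extract_compile_definitions
-- ===== SOURCE A (Python) =====
-- def def_string(d, groupkey="__STATIC"):
--     """ form a compile definitions string as taken by the cmake
--     build system from a sub dictionary """
--     definition = ""
--     if groupkey in d:
--         # extract the dictionary with the static information
--         s = d[groupkey]
--         for key, value in s.items():
--             # if there is already stuff, first append the cmake list delimiter
--             if len(definition) > 0:
--                 # TODO make this nicer
--                 # using '&' as a separator is hopefully helpful with cmake list hell!
--                 definition = definition + "&"
--             # TODO find out what needs to escaped in order to correctly get this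
--             # through cmake and the c preprocessor
--             definition = definition + key.upper() + "=" + value
--     return definition
--
-- def extract_compile_definitions(confs, groupkey="__STATIC"):
--     """ Extract a set of compile definitions from an ini file
--
--     Returns a list of static configurations and a list of indices,
--     which maps the ini files to their static configurations.
--
--     Arguments:
--     ----------
--     confs : list of dicts
--         The list of dictionaries representing the ini file
--
--     Keyword Arguments:
--     ------------------
--     groupkey : string
--         The group key that contains the static information
--     """
--
--     # define a list with all the compile definition configurations found
--     static_confs = []
--     # define a list that maps the configurations to their compile definition (by indexing in above list)
--     indices = []
--
--     for c in confs:
--         # compute the compile definition for this configuration...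
--         definition = def_string(c, groupkey)
--         # ... and lookup whether this definition was already found
--         if definition in static_confs:
--             indices.append(static_confs.index(definition))
--         else:
--             indices.append(len(static_confs))
--             static_confs.append(definition)
--
--     # return the collected information
--     return static_confs, indices
-- ===== SOURCE B (Python) =====
-- def def_string(d, groupkey="__STATIC"):
--     """ form a compile definitions string as taken by the cmake
--     build system from a sub dictionary """
--     definition = ""
--     if groupkey in d:
--         s = d[groupkey]
--         for key, value in s.items():
--             if len(definition) > 0:
--                 definition = definition + "&"
--             definition = definition + key.upper() + "=" + value
--     return definition
--
-- def extract_compile_definitions(confs, groupkey="__STATIC"):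
--     # pass 1: all definition strings
--     defs = [def_string(c, groupkey) for c in confs]
--     # pass 2: ordered dedup (first-appearance order)
--     static_confs = list(dict.fromkeys(defs))
--     # pass 3: position map, then indices
--     pos = {d: i for i, d in enumerate(static_confs)}
--     indices = [pos[d] for d in defs]
--     return static_confs, indices
-- ===== Notes on version B (the rewrite author's own statement) =====
-- stated objective: simpler
-- what changed: Replaced the incremental membership-test/list.index loop by three plain passes: map to definition strings, ordered dedup via dict.fromkeys, and a precomputed position dict used to map each string to its index.
import Mathlib
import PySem

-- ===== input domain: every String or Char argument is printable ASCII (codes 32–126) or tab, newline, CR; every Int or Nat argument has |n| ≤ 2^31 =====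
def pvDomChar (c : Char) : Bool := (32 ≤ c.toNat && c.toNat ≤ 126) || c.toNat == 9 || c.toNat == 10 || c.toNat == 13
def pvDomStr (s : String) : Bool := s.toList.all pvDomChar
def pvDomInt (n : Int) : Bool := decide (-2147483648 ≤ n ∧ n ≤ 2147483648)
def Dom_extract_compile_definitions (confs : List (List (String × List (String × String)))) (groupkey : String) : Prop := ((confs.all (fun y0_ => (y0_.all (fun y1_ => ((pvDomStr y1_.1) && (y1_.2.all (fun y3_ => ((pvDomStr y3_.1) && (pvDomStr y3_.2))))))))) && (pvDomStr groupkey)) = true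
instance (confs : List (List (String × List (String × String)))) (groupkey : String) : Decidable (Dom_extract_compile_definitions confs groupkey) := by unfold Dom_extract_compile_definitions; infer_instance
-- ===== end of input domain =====

-- B replaces A's incremental membership/list.index loop by three plain passes
-- (map to strings, ordered dedup, position-dict lookup); objective: simpler.

-- ===== PORT A =====
-- shared helper def_string (identical in A and B)
def defString (d : List (String × List (String × String))) (groupkey : String) : String :=
  match (PySem.Dict.ofList d).get? groupkey with        -- 'if groupkey in d: s = d[groupkey]'
  | none => ""
  | some s =>
      (PySem.Dict.ofList s).items.foldl
        (fun definition kv =>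
          (if PySem.Str.len definition > 0 then definition ++ "&" else definition)
            ++ PySem.Str.upper kv.1 ++ "=" ++ kv.2) ""

def extract_compile_definitions (confs : List (List (String × List (String × String)))) (groupkey : String) : List String × List Int :=
  confs.foldl
    (fun st c =>
      let definition := defString c groupkey
      match PySem.List.index? st.1 definition with      -- 'if definition in static_confs: … .index(…)'
      | some i => (st.1, st.2 ++ [(i : Int)])
      | none => (st.1 ++ [definition], st.2 ++ [((st.1.length : Nat) : Int)]))
    ([], [])

-- ===== PORT B =====
def extract_compile_definitions_alt (confs : List (List (String × List (String × String)))) (groupkey : String) : List String × List Int :=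
  let defs := confs.map (fun c => defString c groupkey)
  let static_confs := PySem.List.dedup defs            -- list(dict.fromkeys(defs))
  let pos : PySem.Dict String Int :=
    (PySem.List.enumerate static_confs 0).foldl (fun d p => d.insert p.2 p.1) PySem.Dict.empty
  -- pos[d]: the key is always present (d ∈ static_confs), so getD is exact here
  let indices := defs.map (fun s => pos.getD s 0)
  (static_confs, indices)

-- ===== PRECONDITION & SPEC =====
def Spec_extract_compile_definitions (confs : List (List (String × List (String × String)))) (groupkey : String) (out : List String × List Int) : Prop := out = extract_compile_definitions_alt confs groupkey
instance (confs : List (List (String × List (String × String)))) (groupkey : String) (out : List String × List Int) : Decidable (Spec_extract_compile_definitions confs groupkey out) := by unfold Spec_extract_compile_definitions; infer_instance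

-- ===== CLAIM (what is proved, stated in full; the proofs are below) =====
def Claim_equal_extract_compile_definitions : Prop := ∀ (confs : List (List (String × List (String × String)))) (groupkey : String), Dom_extract_compile_definitions confs groupkey → Spec_extract_compile_definitions confs groupkey (extract_compile_definitions confs groupkey)

-- ===== LEMMAS AND PROOFS =====

-- the step of A's fold, on already-computed definition strings
def pvStep (st : List String × List Int) (s : String) : List String × List Int :=
  match PySem.List.index? st.1 s with
  | some i => (st.1, st.2 ++ [(i : Int)])
  | none => (st.1 ++ [s], st.2 ++ [((st.1.length : Nat) : Int)])

-- the final index of a string, read off the full deduped list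
def pvIdx (full : List String) (s : String) : Int :=
  (((PySem.List.index? full s).getD 0 : Nat) : Int)

-- ofList only appends: ofList (pre ++ q) extends ofList pre
lemma ofList_append_prefix {α : Type} [DecidableEq α] (pre q : List α) :
    ∃ t, PySem.Set.ofList (pre ++ q) = PySem.Set.ofList pre ++ t := by
  rw [PySem.Set.ofList_append, PySem.Set.update_eq_append_filter]
  exact ⟨_, rfl⟩

lemma idx_stable {α : Type} [DecidableEq α] (pre q : List α) (s : α) (h : s ∈ PySem.Set.ofList pre) :
    PySem.List.index? (PySem.Set.ofList (pre ++ q)) s = PySem.List.index? (PySem.Set.ofList pre) s := by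
  obtain ⟨t, ht⟩ := ofList_append_prefix pre q
  rw [ht, PySem.List.index?_append_of_mem t h]

-- invariant of A's fold: static is the ordered dedup so far, and every recorded
-- index equals the index in the FINAL deduped list
lemma pvStep_fold (ds : List String) : ∀ (pre : List String) (idx : List Int),
    ds.foldl pvStep (PySem.Set.ofList pre, idx)
      = (PySem.Set.ofList (pre ++ ds),
         idx ++ ds.map (pvIdx (PySem.Set.ofList (pre ++ ds)))) := by
  induction ds with
  | nil => intro pre idx; simp
  | cons s ds ih =>
    intro pre idx
    simp only [List.foldl_cons, List.map_cons]
    by_cases hmem : s ∈ PySem.Set.ofList pre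
    · obtain ⟨i, hi⟩ := Option.isSome_iff_exists.mp
        ((PySem.List.index?_isSome_iff _ _).mpr hmem)
      have heq : PySem.Set.ofList (pre ++ [s]) = PySem.Set.ofList pre := by
        rw [PySem.Set.ofList_append_singleton, PySem.Set.add_of_mem hmem]
      have hstate : pvStep (PySem.Set.ofList pre, idx) s
          = (PySem.Set.ofList (pre ++ [s]), idx ++ [(i : Int)]) := by
        unfold pvStep; rw [hi, heq]
      rw [hstate, ih (pre ++ [s])]
      have hfull : pre ++ [s] ++ ds = pre ++ s :: ds := by simp
      rw [hfull]
      have : pvIdx (PySem.Set.ofList (pre ++ s :: ds)) s = (i : Int) := by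
        unfold pvIdx
        rw [idx_stable pre (s :: ds) s hmem, hi]; rfl
      rw [this]; simp
    · have hnone : PySem.List.index? (PySem.Set.ofList pre) s = none :=
        (PySem.List.index?_eq_none_iff _ _).mpr hmem
      have heq : PySem.Set.ofList (pre ++ [s]) = PySem.Set.ofList pre ++ [s] := by
        rw [PySem.Set.ofList_append_singleton, PySem.Set.add_of_not_mem hmem]
      have hstate : pvStep (PySem.Set.ofList pre, idx) s
          = (PySem.Set.ofList (pre ++ [s]),
             idx ++ [(((PySem.Set.ofList pre).length : Nat) : Int)]) := by
        unfold pvStep; rw [hnone, heq]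
      rw [hstate, ih (pre ++ [s])]
      have hfull : pre ++ [s] ++ ds = pre ++ s :: ds := by simp
      rw [hfull]
      have hsin : s ∈ PySem.Set.ofList (pre ++ [s]) := by
        rw [PySem.Set.mem_ofList]; simp
      have : pvIdx (PySem.Set.ofList (pre ++ s :: ds)) s
          = (((PySem.Set.ofList pre).length : Nat) : Int) := by
        unfold pvIdx
        have h1 : pre ++ s :: ds = (pre ++ [s]) ++ ds := by simp
        rw [h1, idx_stable (pre ++ [s]) ds s hsin]
        rw [heq, PySem.List.index?_append_singleton_self _ s hmem]; rfl
      rw [this]; simp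

-- B's position dict agrees with index? on a duplicate-free list
lemma pos_dict_getD (static : List String) (hnd : static.Nodup) (s : String) :
    ((PySem.List.enumerate static 0).foldl (fun d p => d.insert p.2 p.1)
        (PySem.Dict.empty : PySem.Dict String Int)).getD s 0
      = pvIdx static s := by
  induction static using List.reverseRecOn with
  | nil => simp [pvIdx, PySem.List.enumerate, PySem.Dict.getD, PySem.Dict.get?, PySem.Dict.empty, PySem.List.index?]
  | append_singleton l x ih =>
    have hl : l.Nodup := (List.nodup_append.mp hnd).1
    have hxl : x ∉ l := by
      intro hx
      rw [List.nodup_append] at hnd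
      exact hnd.2.2 x hx x (List.mem_singleton_self x) rfl
    rw [PySem.List.enumerate_append, List.foldl_append]
    simp only [PySem.List.enumerate, List.foldl_cons, List.foldl_nil]
    by_cases hsx : s = x
    · subst hsx
      rw [PySem.Dict.getD_insert_self]
      unfold pvIdx
      rw [PySem.List.index?_append_singleton_self _ _ hxl]
      simp
    · rw [PySem.Dict.getD_insert_of_ne _ _ _ hsx, ih hl]
      unfold pvIdx
      by_cases hsl : s ∈ l
      · rw [PySem.List.index?_append_of_mem [x] hsl]
      · have h1 : PySem.List.index? l s = none := (PySem.List.index?_eq_none_iff _ _).mpr hsl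
        have h2 : PySem.List.index? (l ++ [x]) s = none := by
          rw [PySem.List.index?_eq_none_iff]
          simp [hsl, hsx]
        rw [h1, h2]

-- ===== VERDICT (by name: the statement is the Claim_ definition above) =====
theorem extract_compile_definitions_spec : Claim_equal_extract_compile_definitions := by
  intro confs groupkey _
  unfold Spec_extract_compile_definitions extract_compile_definitions extract_compile_definitions_alt
  have hfold : confs.foldl
      (fun st c =>
        let definition := defString c groupkey
        match PySem.List.index? st.1 definition with
        | some i => (st.1, st.2 ++ [(i : Int)])
        | none => (st.1 ++ [definition], st.2 ++ [((st.1.length : Nat) : Int)]))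
      ([], [])
      = (confs.map (fun c => defString c groupkey)).foldl pvStep ([], []) := by
    rw [List.foldl_map]
    rfl
  rw [hfold]
  have h0 : (([], []) : List String × List Int) = (PySem.Set.ofList [], []) := by
    simp [PySem.Set.ofList_nil]
  rw [h0, pvStep_fold]
  simp only [List.nil_append]
  refine Prod.ext ?_ ?_
  · simp [PySem.List.dedup_eq_ofList]
  · simp only
    apply List.map_congr_left
    intro s _
    rw [pos_dict_getD]
    · rw [PySem.List.dedup_eq_ofList]
    · rw [PySem.List.dedup_eq_ofList]; exact PySem.Set.nodup_ofList _
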